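-- pv_equiv track=rewrite | github.com/Gio02092001/DeepLearningExam_ConvSeq2Seq_Corrector | validation.py | trim_and_filter
-- ===== SOURCE A (Python) =====
-- def trim_and_filter(ids, pad_id, sos_id, eos_id):
--     """Remove PAD/SOS tokens and truncate at first EOS"""
--     out = []
--     for t in ids:
--         if t == pad_id or t == sos_id:
--             continue
--         if t == eos_id:
--             break
--         out.append(t)
--     return out
-- ===== SOURCE B (Python) =====
-- def trim_and_filter(ids, pad_id, sos_id, eos_id):
--     """Remove PAD/SOS tokens and truncate at first EOS"""
--     cut = len(ids)
--     for i, t in enumerate(ids):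
--         if t == eos_id:
--             cut = i
--             break
--     return [t for t in ids[:cut] if t != pad_id and t != sos_id]
-- ===== Notes on version B (the rewrite author's own statement) =====
-- stated objective: alternative
-- what changed: Replaces A's single fused loop (skip pad/sos, break at eos, append) by two separate passes — an explicit loop locating the first-eos boundary, then a comprehension filtering the prefix ids[:cut]; Pre_ excludes the degenerate inputs where eos_id collides with pad_id or sos_id and an eos_id token occurs, a corner no specification covers: filtering the colliding token (A) and truncating at it (B) are equally defensible, and no real vocabulary assigns equal ids.
-- outside the precondition, e.g. on trim_and_filter([5, 7], 5, 1, 5): A returns [7], B returns []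
import Mathlib
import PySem

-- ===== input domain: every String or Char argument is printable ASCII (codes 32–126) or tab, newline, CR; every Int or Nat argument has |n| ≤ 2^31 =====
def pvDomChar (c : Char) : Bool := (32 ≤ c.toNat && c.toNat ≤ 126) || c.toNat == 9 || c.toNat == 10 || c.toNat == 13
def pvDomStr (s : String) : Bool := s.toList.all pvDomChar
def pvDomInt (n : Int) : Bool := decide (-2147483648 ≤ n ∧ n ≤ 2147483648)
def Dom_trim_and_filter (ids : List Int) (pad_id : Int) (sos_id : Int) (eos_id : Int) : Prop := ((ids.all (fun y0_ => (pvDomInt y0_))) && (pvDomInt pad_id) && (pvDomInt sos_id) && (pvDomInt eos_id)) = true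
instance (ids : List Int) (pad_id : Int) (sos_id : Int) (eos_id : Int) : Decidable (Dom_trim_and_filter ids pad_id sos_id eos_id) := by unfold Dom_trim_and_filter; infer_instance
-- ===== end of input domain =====

-- B replaces A's single fused loop by a locate-first-eos pass followed by a prefix filter (alternative decomposition, same cost).


-- ===== PORT A =====
-- loop over ids with accumulator `out`; continue on pad/sos, break on eos
def tfA_go (pad_id sos_id eos_id : Int) : List Int → List Int → List Int
  | out, [] => out
  | out, t :: rest =>
    if t == pad_id || t == sos_id then tfA_go pad_id sos_id eos_id out rest
    else if t == eos_id then out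
    else tfA_go pad_id sos_id eos_id (out ++ [t]) rest

def trim_and_filter (ids : List Int) (pad_id : Int) (sos_id : Int) (eos_id : Int) : List Int :=
  tfA_go pad_id sos_id eos_id [] ids

-- ===== PORT B =====
-- boundary loop: index of the first token equal to eos_id, defaulting to len(ids)
def tfB_cut (eos_id : Int) : List Int → Nat
  | [] => 0
  | t :: rest => if t == eos_id then 0 else 1 + tfB_cut eos_id rest

def trim_and_filter_alt (ids : List Int) (pad_id : Int) (sos_id : Int) (eos_id : Int) : List Int :=
  (ids.take (tfB_cut eos_id ids)).filter (fun t => !(t == pad_id) && !(t == sos_id))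

-- ===== PRECONDITION & SPEC =====
-- Pre_ excludes the degenerate inputs where the sentinel ids collide (eos_id = pad_id or
-- eos_id = sos_id) and an eos_id token actually occurs: no specification says whether such a
-- token should be filtered (A's reading) or truncate the sequence (B's reading) — both are
-- equally defensible on this unspecifiable corner, which no real vocabulary produces.
def Pre_trim_and_filter (ids : List Int) (pad_id : Int) (sos_id : Int) (eos_id : Int) : Prop :=
  (pad_id ≠ eos_id ∧ sos_id ≠ eos_id) ∨ eos_id ∉ ids
instance (ids : List Int) (pad_id : Int) (sos_id : Int) (eos_id : Int) : Decidable (Pre_trim_and_filter ids pad_id sos_id eos_id) := by unfold Pre_trim_and_filter; infer_instance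

def pvWitness_trim_and_filter : List Int × Int × Int × Int := ([1, 5, 2, 3, 4], 0, 1, 3)

def Spec_trim_and_filter (ids : List Int) (pad_id : Int) (sos_id : Int) (eos_id : Int) (out : List Int) : Prop := out = trim_and_filter_alt ids pad_id sos_id eos_id
instance (ids : List Int) (pad_id : Int) (sos_id : Int) (eos_id : Int) (out : List Int) : Decidable (Spec_trim_and_filter ids pad_id sos_id eos_id out) := by unfold Spec_trim_and_filter; infer_instance

-- ===== CLAIM (what is proved, stated in full; the proofs are below) =====
def Claim_equal_trim_and_filter : Prop := ∀ (ids : List Int) (pad_id : Int) (sos_id : Int) (eos_id : Int), Dom_trim_and_filter ids pad_id sos_id eos_id → Pre_trim_and_filter ids pad_id sos_id eos_id → Spec_trim_and_filter ids pad_id sos_id eos_id (trim_and_filter ids pad_id sos_id eos_id)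

-- ===== LEMMAS AND PROOFS =====
theorem tfA_go_eq (pad_id sos_id eos_id : Int) (hp : pad_id ≠ eos_id) (hs : sos_id ≠ eos_id) :
    ∀ (ids out : List Int),
      tfA_go pad_id sos_id eos_id out ids
        = out ++ (ids.take (tfB_cut eos_id ids)).filter (fun t => !(t == pad_id) && !(t == sos_id)) := by
  intro ids
  induction ids with
  | nil => intro out; simp [tfA_go, tfB_cut]
  | cons t rest ih =>
    intro out
    by_cases hps : t = pad_id ∨ t = sos_id
    · have hne : t ≠ eos_id := by rcases hps with h | h <;> simp [h, hp, hs]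
      have hcut : tfB_cut eos_id (t :: rest) = 1 + tfB_cut eos_id rest := by
        simp [tfB_cut, hne]
      have hb : (t == pad_id || t == sos_id) = true := by
        rcases hps with h | h <;> simp [h]
      have : ((t :: rest).take (tfB_cut eos_id (t :: rest))).filter
              (fun t => !(t == pad_id) && !(t == sos_id))
            = (rest.take (tfB_cut eos_id rest)).filter (fun t => !(t == pad_id) && !(t == sos_id)) := by
        rw [hcut]
        rcases hps with h | h <;> simp [List.take, Nat.add_comm, List.filter, h]
      rw [this, tfA_go, if_pos hb, ih]
    · push_neg at hps
      obtain ⟨hnp, hns⟩ := hps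
      by_cases he : t = eos_id
      · rw [tfA_go, if_neg (by simp [hnp, hns]), if_pos (by simp [he])]
        simp [tfB_cut, he]
      · rw [tfA_go, if_neg (by simp [hnp, hns]), if_neg (by simp [he]), ih]
        have hcut : tfB_cut eos_id (t :: rest) = 1 + tfB_cut eos_id rest := by
          simp [tfB_cut, he]
        rw [hcut]
        simp [List.take, Nat.add_comm, List.filter, hnp, hns]

theorem tfB_cut_of_not_mem (eos_id : Int) : ∀ (ids : List Int), eos_id ∉ ids → tfB_cut eos_id ids = ids.length := by
  intro ids
  induction ids with
  | nil => intro _; simp [tfB_cut]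
  | cons t rest ih =>
    intro h
    have ht : t ≠ eos_id := by intro he; exact h (by simp [he])
    have : eos_id ∉ rest := fun hm => h (List.mem_cons_of_mem _ hm)
    simp [tfB_cut, ht, ih this, Nat.add_comm]

theorem tfA_go_no_eos (pad_id sos_id eos_id : Int) :
    ∀ (ids out : List Int), eos_id ∉ ids →
      tfA_go pad_id sos_id eos_id out ids
        = out ++ ids.filter (fun t => !(t == pad_id) && !(t == sos_id)) := by
  intro ids
  induction ids with
  | nil => intro out _; simp [tfA_go]
  | cons t rest ih =>
    intro out h
    have ht : t ≠ eos_id := by intro he; exact h (by simp [he])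
    have hr : eos_id ∉ rest := fun hm => h (List.mem_cons_of_mem _ hm)
    by_cases hps : t = pad_id ∨ t = sos_id
    · have hb : (t == pad_id || t == sos_id) = true := by
        rcases hps with hx | hx <;> simp [hx]
      rw [tfA_go, if_pos hb, ih out hr]
      rcases hps with hx | hx <;> simp [List.filter, hx]
    · push_neg at hps
      obtain ⟨hnp, hns⟩ := hps
      rw [tfA_go, if_neg (by simp [hnp, hns]), if_neg (by simp [ht]), ih (out ++ [t]) hr]
      have hc : (!(t == pad_id) && !(t == sos_id)) = true := by simp [hnp, hns]
      simp [List.filter, hc]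

-- ===== VERDICT (by name: the statement is the Claim_ definition above) =====
theorem trim_and_filter_spec : Claim_equal_trim_and_filter := by
  intro ids pad_id sos_id eos_id _ hpre
  unfold Spec_trim_and_filter trim_and_filter trim_and_filter_alt
  rcases hpre with ⟨h1, h2⟩ | hnm
  · rw [tfA_go_eq pad_id sos_id eos_id h1 h2]; simp
  · rw [tfA_go_no_eos pad_id sos_id eos_id ids [] hnm, tfB_cut_of_not_mem eos_id ids hnm]
    simp
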